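-- pv_equiv track=rewrite | github.com/hayoung-99/algorithm | 프로그래머스/2/42586. 기능개발/기능개발.py | solution
-- ===== SOURCE A (Python) =====
-- import math
--
-- def solution(progresses, speeds):
--     # 남은 개발 일수 구하기
--     days = []
--     for progress, speed in zip(progresses, speeds):
--         rest_days = math.ceil((100 - progress) / speed)
--         days.append(rest_days)
--
--     # 날마다 배포되는 기능 수 구하기
--     answer = []
--     temp_size = days[0]
--     temp_length = 1
--
--     for i in range(1, len(days)):
--         if temp_size >= days[i]:
--             temp_length += 1
--
--         else:
--             answer.append(temp_length)
--             temp_length = 1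
--             temp_size = days[i]
--
--         # 마지막 배포인 경우
--         if i == len(days) - 1:
--             answer.append(temp_length)
--
--     return answer
-- ===== SOURCE B (Python) =====
-- import math
--
-- def solution(progresses, speeds):
--     # remaining days per feature
--     days = [math.ceil((100 - p) / s) for p, s in zip(progresses, speeds)]
--     # stage 1: prefix-maximum of remaining days
--     m = days[0]
--     maxes = [m]
--     for d in days[1:]:
--         if d > m:
--             m = d
--         maxes.append(m)
--     # stage 2: a new deploy group starts exactly where the prefix maximum increases
--     bounds = [i for i in range(1, len(days)) if maxes[i] > maxes[i - 1]]
--     # stage 3: group sizes are the gaps between consecutive cut points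
--     cuts = [0] + bounds + [len(days)]
--     return [cuts[k + 1] - cuts[k] for k in range(len(cuts) - 1)]
-- ===== Notes on version B (the rewrite author's own statement) =====
-- stated objective: alternative
-- what changed: Replaces A's single stateful grouping pass (threading answer/temp_size/temp_length through one loop with a special last-index append) by a staged pipeline: a prefix-maximum scan over the remaining-days list, extraction of the indices where the prefix maximum increases (the deploy-group boundaries), and adjacent differences of the cut points.
-- intended difference: When exactly one feature is zipped (min(len(progresses),len(speeds)) == 1), A's loop over range(1,1) never runs and it returns [], while B returns [1], the intended answer: that single feature is deployed on its own day. — e.g. on solution([93], [1]): A returns [], B returns [1]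
import Mathlib
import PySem

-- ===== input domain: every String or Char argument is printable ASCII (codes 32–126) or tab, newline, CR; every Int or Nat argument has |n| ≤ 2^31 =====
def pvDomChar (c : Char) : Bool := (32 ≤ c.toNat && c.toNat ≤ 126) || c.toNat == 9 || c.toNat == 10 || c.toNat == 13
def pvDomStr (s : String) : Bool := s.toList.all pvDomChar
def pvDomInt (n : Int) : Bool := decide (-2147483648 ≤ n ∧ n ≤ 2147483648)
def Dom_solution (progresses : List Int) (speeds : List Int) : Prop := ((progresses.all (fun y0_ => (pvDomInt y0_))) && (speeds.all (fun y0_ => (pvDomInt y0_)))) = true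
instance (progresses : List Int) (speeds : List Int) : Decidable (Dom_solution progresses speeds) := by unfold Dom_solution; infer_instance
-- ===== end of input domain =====

-- B replaces A's single stateful grouping pass by a staged pipeline (prefix-maximum scan,
-- boundary extraction where the prefix maximum increases, adjacent differences of the cut
-- points); equal everywhere except the single-feature input (D_ below), where B returns the
-- intended [1] instead of A's [].

-- ===== PORT A =====
-- math.ceil((100 - p) / s): exact on Dom (the quotient of these 32-bit ints is computed
-- exactly enough by the float division that its ceil equals the exact rational ceil),
-- ported as the exact ceiling -((-(100 - p)) // s) with Python floor division.
def pvCeilDays (p : Int) (s : Int) : Int := -(PySem.Int.floordiv (-(100 - p)) s)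

-- the loop body of A's second for-loop; state = (answer, temp_size, temp_length)
def pvAbody (days : List Int) (st : List Int × Int × Int) (i : Int) : List Int × Int × Int :=
  let st' :=
    if st.2.1 ≥ PySem.List.pyGetD days i 0 then (st.1, st.2.1, st.2.2 + 1)
    else (st.1 ++ [st.2.2], PySem.List.pyGetD days i 0, (1 : Int))
  if i = (days.length : Int) - 1 then (st'.1 ++ [st'.2.2], st'.2.1, st'.2.2) else st'

def solution (progresses : List Int) (speeds : List Int) : List Int :=
  let days := (progresses.zip speeds).foldl (fun acc ps => acc ++ [pvCeilDays ps.1 ps.2]) []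
  -- days[0]: raises IndexError when empty; Pre_ excludes that, default never read there
  let tempSize := PySem.List.pyGetD days 0 0
  let st := (PySem.List.pyRange 1 (days.length : Int) 1).foldl (pvAbody days) ([], tempSize, (1 : Int))
  st.1

-- ===== PORT B =====
def solution_alt (progresses : List Int) (speeds : List Int) : List Int :=
  let days := (progresses.zip speeds).map (fun ps => pvCeilDays ps.1 ps.2)
  -- days[0]: raises IndexError when days is empty; Pre_ excludes that, default never read there
  let m0 := PySem.List.pyGetD days 0 0
  -- for d in days[1:]: …  (days[1:] = days.drop 1, PySem slice_from_one); state = (maxes, m)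
  let st := (days.drop 1).foldl
    (fun (st : List Int × Int) d =>
      let m := if d > st.2 then d else st.2
      (st.1 ++ [m], m)) ([m0], m0)
  let maxes := st.1
  let bounds := (PySem.List.pyRange 1 (days.length : Int) 1).filter
    (fun i => decide (PySem.List.pyGetD maxes (i - 1) 0 < PySem.List.pyGetD maxes i 0))
  let cuts := (0 : Int) :: (bounds ++ [(days.length : Int)])
  (PySem.List.pyRange 0 ((cuts.length : Int) - 1) 1).map
    (fun k => PySem.List.pyGetD cuts (k + 1) 0 - PySem.List.pyGetD cuts k 0)

-- ===== PRECONDITION & SPEC =====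
-- Pre_ excludes the inputs where A raises: empty zipped input (IndexError at days[0])
-- and a zero speed among the zipped pairs (ZeroDivisionError).
def Pre_solution (progresses : List Int) (speeds : List Int) : Prop :=
  progresses ≠ [] ∧ speeds ≠ [] ∧ ∀ q ∈ progresses.zip speeds, q.2 ≠ 0
instance (progresses : List Int) (speeds : List Int) : Decidable (Pre_solution progresses speeds) := by
  unfold Pre_solution; infer_instance
def pvWitness_solution : List Int × List Int := ([30, 99], [30, 1])

-- When exactly one feature is zipped, A's loop over range(1,1) never runs and A returns [],
-- while B returns [1], the intended answer: that single feature deploys on its own day.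
def D_solution (progresses : List Int) (speeds : List Int) : Prop :=
  min progresses.length speeds.length = 1
instance (progresses : List Int) (speeds : List Int) : Decidable (D_solution progresses speeds) := by
  unfold D_solution; infer_instance

def Spec_solution (progresses : List Int) (speeds : List Int) (out : List Int) : Prop :=
  ¬ D_solution progresses speeds → out = solution_alt progresses speeds
instance (progresses : List Int) (speeds : List Int) (out : List Int) : Decidable (Spec_solution progresses speeds out) := by
  unfold Spec_solution; infer_instance

def pvDiffWitness_solution : List Int × List Int := ([93], [1])
def pvDiffWitnessOut_solution : (List Int) × (List Int) := ([], [1])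

-- ===== CLAIM (what is proved, stated in full; the proofs are below) =====
def Claim_unchanged_solution : Prop := ∀ (progresses : List Int) (speeds : List Int), Dom_solution progresses speeds → Pre_solution progresses speeds → Spec_solution progresses speeds (solution progresses speeds)
def Claim_changed_solution : Prop := Dom_solution (pvDiffWitness_solution.1) (pvDiffWitness_solution.2) ∧ Pre_solution (pvDiffWitness_solution.1) (pvDiffWitness_solution.2) ∧ D_solution (pvDiffWitness_solution.1) (pvDiffWitness_solution.2) ∧ solution (pvDiffWitness_solution.1) (pvDiffWitness_solution.2) = pvDiffWitnessOut_solution.1 ∧ solution_alt (pvDiffWitness_solution.1) (pvDiffWitness_solution.2) = pvDiffWitnessOut_solution.2 ∧ pvDiffWitnessOut_solution.1 ≠ pvDiffWitnessOut_solution.2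
def Claim_exact_solution : Prop := ∀ (progresses : List Int) (speeds : List Int), Dom_solution progresses speeds → Pre_solution progresses speeds → D_solution progresses speeds → solution progresses speeds ≠ solution_alt progresses speeds

-- ===== LEMMAS AND PROOFS =====

-- reference grouping: leader d, group = d plus following run of days ≤ d
def pvSpec : List Int → List Int
  | [] => []
  | d :: r =>
      (1 + ((r.takeWhile (fun x => decide (x ≤ d))).length : Int)) ::
        pvSpec (r.dropWhile (fun x => decide (x ≤ d)))
termination_by l => l.length
decreasing_by
  simp only [List.length_cons]
  exact Nat.lt_succ_of_le (List.length_dropWhile_le _ _)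

-- ---------- A-side: A's fold equals pvSpec ----------

theorem pv_foldl_append_map {α β : Type} (f : α → β) (l : List α) (acc : List β) :
    l.foldl (fun a x => a ++ [f x]) acc = acc ++ l.map f := by
  induction l generalizing acc with
  | nil => simp
  | cons x xs ih => simp [List.foldl_cons, ih]

theorem pv_loopA_spec (days : List Int) (s : List Int) (k : Nat)
    (hdrop : days.drop k = s) (hk : 1 ≤ k) (hne : s ≠ []) :
    ∀ (ans : List Int) (size len : Int),
    ((PySem.List.pyRange (k : Int) (days.length : Int) 1).foldl (pvAbody days) (ans, size, len)).1
      = ans ++ (len + ((s.takeWhile (fun x => decide (x ≤ size))).length : Int)) ::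
          pvSpec (s.dropWhile (fun x => decide (x ≤ size))) := by
  induction s generalizing k with
  | nil => exact absurd rfl hne
  | cons d rest ih =>
    intro ans size len
    have hklt : k < days.length := by
      by_contra hc
      rw [List.drop_eq_nil_of_le (by omega)] at hdrop
      exact (List.cons_ne_nil d rest) hdrop.symm
    have hget : PySem.List.pyGetD days (k : Int) 0 = d := by
      rw [PySem.List.pyGetD_natCast]
      rw [List.getD_eq_getElem days 0 hklt]
      have := List.drop_eq_getElem_cons hklt
      rw [hdrop] at this
      exact (List.cons.injEq .. ▸ this).1.symm
    have hrest : days.drop (k + 1) = rest := by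
      have := List.drop_eq_getElem_cons hklt
      rw [hdrop] at this
      exact ((List.cons.injEq .. ▸ this).2).symm
    have hlen : days.length = k + 1 + rest.length := by
      have := congrArg List.length hdrop
      simp at this
      omega
    rw [PySem.List.pyRange_one_cons (by exact_mod_cast hklt), List.foldl_cons]
    cases hr : rest with
    | nil =>
      have hlast : (k : Int) = (days.length : Int) - 1 := by
        subst hr; simp at hlen; omega
      have hnil : PySem.List.pyRange ((k : Int) + 1) (days.length : Int) 1 = [] :=
        PySem.List.pyRange_one_eq_nil (by omega)
      rw [hnil, List.foldl_nil]
      subst hr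
      by_cases hle : size ≥ d
      · simp only [pvAbody, hget, if_pos hle, if_pos hlast]
        simp [hle, pvSpec]
      · simp only [pvAbody, hget, if_neg hle, if_pos hlast]
        have : ¬ d ≤ size := by omega
        simp [this, pvSpec]
    | cons e rest' =>
      have hnotlast : ¬ (k : Int) = (days.length : Int) - 1 := by
        subst hr; simp at hlen; omega
      have hrestne : rest ≠ [] := by rw [hr]; exact List.cons_ne_nil e rest'
      rw [← hr]
      by_cases hle : size ≥ d
      · simp only [pvAbody, hget, if_pos hle, if_neg hnotlast]
        have := ih (k + 1) (by exact_mod_cast hrest) (by omega) hrestne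
          ans size (len + 1)
        push_cast at this ⊢
        rw [this]
        have hd : d ≤ size := by omega
        simp [hd]
        ring_nf
      · simp only [pvAbody, hget, if_neg hle, if_neg hnotlast]
        have := ih (k + 1) (by exact_mod_cast hrest) (by omega) hrestne
          (ans ++ [len]) d 1
        push_cast at this ⊢
        rw [this]
        have hd : ¬ d ≤ size := by omega
        simp [hd, pvSpec]

theorem pv_days_eq (progresses speeds : List Int) :
    (progresses.zip speeds).foldl (fun acc ps => acc ++ [pvCeilDays ps.1 ps.2]) []
      = (progresses.zip speeds).map (fun ps => pvCeilDays ps.1 ps.2) := by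
  rw [pv_foldl_append_map]
  rfl

theorem pv_loop_core (days : List Int) (h2 : 2 ≤ days.length) :
    ((PySem.List.pyRange 1 (days.length : Int) 1).foldl
        (pvAbody days) ([], PySem.List.pyGetD days 0 0, 1)).1 = pvSpec days := by
  cases days with
  | nil => simp at h2
  | cons d0 t =>
    have htne : t ≠ [] := by
      intro hc; subst hc; simp at h2
    have hdropt : (d0 :: t).drop 1 = t := rfl
    have hmain := pv_loopA_spec (d0 :: t) t 1 hdropt (le_refl 1) htne [] d0 1
    rw [PySem.List.pyGetD_zero_cons]
    have hps : pvSpec (d0 :: t)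
        = [] ++ (1 + ((t.takeWhile (fun x => decide (x ≤ d0))).length : Int)) ::
            pvSpec (t.dropWhile (fun x => decide (x ≤ d0))) := by
      simp [pvSpec]
    rw [hps]
    exact_mod_cast hmain

theorem pv_solution_eq_spec (progresses speeds : List Int)
    (h2 : 2 ≤ (progresses.zip speeds).length) :
    solution progresses speeds
      = pvSpec ((progresses.zip speeds).map (fun ps => pvCeilDays ps.1 ps.2)) := by
  have h2' : 2 ≤ ((progresses.zip speeds).map (fun ps => pvCeilDays ps.1 ps.2)).length := by
    rw [List.length_map]; exact h2
  unfold solution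
  rw [pv_days_eq]
  exact pv_loop_core _ h2'

-- ---------- B-side: the staged pipeline equals pvSpec ----------

-- running-maximum scan (the values appended by B's first loop)
def pvScan (m : Int) : List Int → List Int
  | [] => []
  | d :: r => (if d > m then d else m) :: pvScan (if d > m then d else m) r

theorem pvScan_length (m : Int) (l : List Int) : (pvScan m l).length = l.length := by
  induction l generalizing m with
  | nil => rfl
  | cons d r ih => simp [pvScan, ih]

theorem pv_foldl_scan (l : List Int) (acc : List Int) (m : Int) :
    (l.foldl (fun (st : List Int × Int) d =>
        let m' := if d > st.2 then d else st.2
        (st.1 ++ [m'], m')) (acc, m)).1 = acc ++ pvScan m l := by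
  induction l generalizing acc m with
  | nil => simp [pvScan]
  | cons d r ih =>
    simp only [List.foldl_cons, pvScan]
    rw [ih]
    simp

theorem pv_foldl_scan1 (l : List Int) (m : Int) :
    (l.foldl (fun (st : List Int × Int) d =>
        let m' := if d > st.2 then d else st.2
        (st.1 ++ [m'], m')) ([m], m)).1 = m :: pvScan m l := by
  rw [pv_foldl_scan]
  rfl

-- boundaries read off a list of maxes values (prev = previous entry)
def pvB (i : Int) (prev : Int) : List Int → List Int
  | [] => []
  | m :: ms => if prev < m then i :: pvB (i + 1) m ms else pvB (i + 1) m ms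

-- boundaries read off the days themselves, keeping the running maximum
def pvBndsD (i : Int) (prev : Int) : List Int → List Int
  | [] => []
  | x :: xs => if prev < x then i :: pvBndsD (i + 1) x xs else pvBndsD (i + 1) prev xs

-- adjacent differences
def pvDiffs : List Int → List Int
  | [] => []
  | [_] => []
  | a :: b :: r => (b - a) :: pvDiffs (b :: r)

theorem pv_getD_append (l1 : List Int) (a : Int) (l2 : List Int) (d : Int) :
    (l1 ++ a :: l2).getD l1.length d = a := by
  induction l1 with
  | nil => rfl
  | cons x xs ih => simp only [List.cons_append, List.length_cons, List.getD_cons_succ]; exact ih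

-- B's filter over the index range equals the pvB walk over the maxes list
theorem pv_filter_bounds (suf : List Int) : ∀ (pre : List Int) (prev : Int),
    (PySem.List.pyRange ((pre.length : Int) + 1) (((pre ++ prev :: suf).length : Int)) 1).filter
        (fun i => decide (PySem.List.pyGetD (pre ++ prev :: suf) (i - 1) 0
            < PySem.List.pyGetD (pre ++ prev :: suf) i 0))
      = pvB ((pre.length : Int) + 1) prev suf := by
  induction suf with
  | nil =>
    intro pre prev
    rw [PySem.List.pyRange_one_eq_nil (by simp)]
    rfl
  | cons m ms ih =>
    intro pre prev
    have hlen : ((pre ++ prev :: m :: ms).length : Int) = (pre.length : Int) + 2 + ms.length := by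
      simp; omega
    have hlt : (pre.length : Int) + 1 < ((pre ++ prev :: m :: ms).length : Int) := by
      rw [hlen]; omega
    rw [PySem.List.pyRange_one_cons hlt, List.filter_cons]
    have hga : PySem.List.pyGetD (pre ++ prev :: m :: ms) ((pre.length : Int) + 1 - 1) 0 = prev := by
      have : ((pre.length : Int) + 1 - 1) = ((pre.length : Nat) : Int) := by omega
      rw [this, PySem.List.pyGetD_natCast]
      exact pv_getD_append pre prev (m :: ms) 0
    have hgb : PySem.List.pyGetD (pre ++ prev :: m :: ms) ((pre.length : Int) + 1) 0 = m := by
      have h1 : ((pre.length : Int) + 1) = (((pre ++ [prev]).length : Nat) : Int) := by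
        simp
      rw [h1, PySem.List.pyGetD_natCast]
      have h2 : pre ++ prev :: m :: ms = (pre ++ [prev]) ++ m :: ms := by simp
      rw [h2]
      exact pv_getD_append (pre ++ [prev]) m ms 0
    have hrec := ih (pre ++ [prev]) m
    have h2 : pre ++ prev :: m :: ms = (pre ++ [prev]) ++ m :: ms := by simp
    have hlen2 : (((pre ++ [prev]).length : Nat) : Int) + 1 = (pre.length : Int) + 2 := by
      have h3 : (pre ++ [prev]).length = pre.length + 1 := by simp
      rw [h3]; push_cast; ring
    rw [← h2, hlen2] at hrec
    have hrange2 : (pre.length : Int) + 1 + 1 = (pre.length : Int) + 2 := by omega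
    rw [hga, hgb, hrange2, hrec]
    simp only [pvB]
    by_cases hpm : prev < m
    · simp [hpm, hrange2]
    · simp [hpm, hrange2]

theorem pv_pvB_scan (xs : List Int) : ∀ (i prev : Int),
    pvB i prev (pvScan prev xs) = pvBndsD i prev xs := by
  induction xs with
  | nil => intro i prev; rfl
  | cons x xs ih =>
    intro i prev
    by_cases hx : x > prev
    · have hm : (if x > prev then x else prev) = x := if_pos hx
      simp only [pvScan, hm, pvB, pvBndsD, if_pos hx, ih]
    · have hm : (if x > prev then x else prev) = prev := if_neg hx
      have hpp : ¬ prev < prev := lt_irrefl prev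
      simp only [pvScan, hm, pvB, pvBndsD, if_neg hx, if_neg hpp, ih]

-- B's final map over the index range equals the pvDiffs walk over cuts
theorem pv_map_diffs (suf : List Int) : ∀ (pre : List Int) (a : Int),
    (PySem.List.pyRange ((pre.length : Int)) (((pre ++ a :: suf).length : Int) - 1) 1).map
        (fun k => PySem.List.pyGetD (pre ++ a :: suf) (k + 1) 0
            - PySem.List.pyGetD (pre ++ a :: suf) k 0)
      = pvDiffs (a :: suf) := by
  induction suf with
  | nil =>
    intro pre a
    rw [PySem.List.pyRange_one_eq_nil (by simp)]
    rfl
  | cons b r ih =>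
    intro pre a
    have hlt : (pre.length : Int) < ((pre ++ a :: b :: r).length : Int) - 1 := by
      simp; omega
    rw [PySem.List.pyRange_one_cons hlt, List.map_cons]
    have hga : PySem.List.pyGetD (pre ++ a :: b :: r) ((pre.length : Int)) 0 = a := by
      rw [show ((pre.length : Int)) = ((pre.length : Nat) : Int) from rfl, PySem.List.pyGetD_natCast]
      exact pv_getD_append pre a (b :: r) 0
    have hgb : PySem.List.pyGetD (pre ++ a :: b :: r) ((pre.length : Int) + 1) 0 = b := by
      have h1 : ((pre.length : Int) + 1) = (((pre ++ [a]).length : Nat) : Int) := by simp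
      rw [h1, PySem.List.pyGetD_natCast]
      have h2 : pre ++ a :: b :: r = (pre ++ [a]) ++ b :: r := by simp
      rw [h2]
      exact pv_getD_append (pre ++ [a]) b r 0
    have hrec := ih (pre ++ [a]) b
    have h2 : pre ++ a :: b :: r = (pre ++ [a]) ++ b :: r := by simp
    have hlen2 : (((pre ++ [a]).length : Nat) : Int) = (pre.length : Int) + 1 := by simp
    rw [← h2, hlen2] at hrec
    rw [hga, hgb, hrec]
    rfl

theorem pv_bndsD_shift (xs : List Int) : ∀ (i c prev : Int),
    pvBndsD (i + c) prev xs = (pvBndsD i prev xs).map (· + c) := by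
  induction xs with
  | nil => intro i c prev; rfl
  | cons x xs ih =>
    intro i c prev
    by_cases hx : prev < x
    · simp only [pvBndsD, if_pos hx, List.map_cons]
      rw [show i + c + 1 = (i + 1) + c by ring, ih]
    · simp only [pvBndsD, if_neg hx]
      rw [show i + c + 1 = (i + 1) + c by ring, ih]

theorem pv_diffs_map_add (c : Int) : ∀ (l : List Int),
    pvDiffs (l.map (· + c)) = pvDiffs l := by
  intro l
  induction l with
  | nil => rfl
  | cons a t ih =>
    cases t with
    | nil => rfl
    | cons b r =>
      simp only [List.map_cons] at ih ⊢
      simp only [pvDiffs, ih]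
      congr 1
      ring

theorem pv_bndsD_prefix (t : List Int) : ∀ (i d : Int) (rest : List Int),
    (∀ x ∈ t, x ≤ d) → pvBndsD i d (t ++ rest) = pvBndsD (i + (t.length : Int)) d rest := by
  induction t with
  | nil => intro i d rest _; simp
  | cons x xs ih =>
    intro i d rest hall
    have hx : ¬ d < x := not_lt.mpr (hall x (List.mem_cons_self ..))
    simp only [List.cons_append, pvBndsD, if_neg hx]
    rw [ih (i + 1) d rest (fun y hy => hall y (List.mem_cons_of_mem _ hy))]
    congr 1
    simp
    ring

theorem pv_dropWhile_head {p : Int → Bool} : ∀ (l : List Int) (b : Int) (t : List Int),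
    l.dropWhile p = b :: t → p b = false := by
  intro l
  induction l with
  | nil => intro b t h; simp [List.dropWhile] at h
  | cons x xs ih =>
    intro b t h
    by_cases hp : p x
    · rw [List.dropWhile_cons_of_pos hp] at h
      exact ih b t h
    · rw [List.dropWhile_cons_of_neg hp] at h
      cases h
      exact eq_false_of_ne_true hp

-- the heart of the proof: diffs of (0 :: boundaries ++ [n]) reproduce the run grouping
theorem pv_diffs_bnds (d : Int) (r : List Int) :
    pvDiffs ((0 : Int) :: (pvBndsD 1 d r ++ [(r.length : Int) + 1])) = pvSpec (d :: r) := by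
  have hsplit := List.takeWhile_append_dropWhile
    (p := fun x => decide (x ≤ d)) (l := r)
  set t := r.takeWhile (fun x => decide (x ≤ d)) with ht
  set rest := r.dropWhile (fun x => decide (x ≤ d)) with hrest
  have hallt : ∀ x ∈ t, x ≤ d := by
    intro x hx
    have := List.mem_takeWhile_imp hx
    exact of_decide_eq_true this
  have hbnds : pvBndsD 1 d r = pvBndsD (1 + (t.length : Int)) d rest := by
    conv_lhs => rw [← hsplit]
    exact pv_bndsD_prefix t 1 d rest hallt
  have hlen : (r.length : Int) = (t.length : Int) + (rest.length : Int) := by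
    have := congrArg List.length hsplit
    simp at this
    omega
  cases hre : rest with
  | nil =>
    have htr : t = r := by rw [← hsplit, hre]; simp
    rw [hbnds, hre]
    simp only [pvBndsD, List.nil_append]
    have hdd : pvDiffs [(0 : Int), (r.length : Int) + 1]
        = [((r.length : Int) + 1) - 0] := rfl
    rw [hdd, pvSpec, ← ht, ← hrest, hre, htr]
    simp [pvSpec]
    omega
  | cons e rest' =>
    have he : ¬ e ≤ d := by
      exact of_decide_eq_false (pv_dropWhile_head r e rest' (by rw [← hrest]; exact hre))
    have hde : d < e := lt_of_not_ge he
    rw [hbnds, hre]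
    simp only [pvBndsD, if_pos hde]
    have hshift : pvBndsD (1 + (t.length : Int) + 1) e rest'
        = (pvBndsD 1 e rest').map (· + (1 + (t.length : Int))) := by
      rw [show (1 : Int) + (t.length : Int) + 1 = 1 + (1 + (t.length : Int)) by ring]
      exact pv_bndsD_shift rest' 1 (1 + (t.length : Int)) e
    have hlast : (r.length : Int) + 1 = ((rest'.length : Int) + 1) + (1 + (t.length : Int)) := by
      rw [hlen, hre]; push_cast [List.length_cons]; ring
    rw [hshift, hlast]
    have hlist : ((1 + (t.length : Int)) :: List.map (· + (1 + (t.length : Int))) (pvBndsD 1 e rest')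
          ++ [(rest'.length : Int) + 1 + (1 + (t.length : Int))])
        = ((0 : Int) :: (pvBndsD 1 e rest' ++ [(rest'.length : Int) + 1])).map
            (· + (1 + (t.length : Int))) := by
      simp
    rw [hlist]
    have hstep : pvDiffs ((0 : Int) :: (((0 : Int) :: (pvBndsD 1 e rest'
            ++ [(rest'.length : Int) + 1])).map (· + (1 + (t.length : Int)))))
        = ((0 + (1 + (t.length : Int))) - 0) :: pvDiffs (((0 : Int) :: (pvBndsD 1 e rest'
            ++ [(rest'.length : Int) + 1])).map (· + (1 + (t.length : Int)))) := rfl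
    rw [hstep, pv_diffs_map_add]
    have hih : pvDiffs ((0 : Int) :: (pvBndsD 1 e rest' ++ [(rest'.length : Int) + 1]))
        = pvSpec (e :: rest') := pv_diffs_bnds e rest'
    rw [hih]
    conv_rhs => rw [pvSpec]
    rw [← ht, ← hrest, hre]
    congr 1
    omega
termination_by r.length
decreasing_by
  have hlt : rest.length < (d :: r).length := by
    rw [hrest]
    simp only [List.length_cons]
    exact Nat.lt_succ_of_le (List.length_dropWhile_le _ _)
  rw [hre] at hlt
  simp at hlt
  omega

theorem pv_filter_bounds1 (prev : Int) (suf : List Int) :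
    (PySem.List.pyRange 1 (((prev :: suf).length : Int)) 1).filter
        (fun i => decide (PySem.List.pyGetD (prev :: suf) (i - 1) 0
            < PySem.List.pyGetD (prev :: suf) i 0))
      = pvB 1 prev suf := by
  have h := pv_filter_bounds suf [] prev
  simp only [List.nil_append, List.length_nil, Nat.cast_zero, zero_add] at h
  exact h

theorem pv_map_diffs1 (a : Int) (suf : List Int) :
    (PySem.List.pyRange 0 (((a :: suf).length : Int) - 1) 1).map
        (fun k => PySem.List.pyGetD (a :: suf) (k + 1) 0 - PySem.List.pyGetD (a :: suf) k 0)
      = pvDiffs (a :: suf) := by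
  have h := pv_map_diffs suf [] a
  simp only [List.nil_append, List.length_nil, Nat.cast_zero] at h
  exact h

theorem pv_alt_eq_spec (progresses speeds : List Int)
    (hne : (progresses.zip speeds) ≠ []) :
    solution_alt progresses speeds
      = pvSpec ((progresses.zip speeds).map (fun ps => pvCeilDays ps.1 ps.2)) := by
  cases hd : (progresses.zip speeds).map (fun ps => pvCeilDays ps.1 ps.2) with
  | nil =>
    exact absurd (List.map_eq_nil_iff.mp hd) hne
  | cons d tl =>
    simp only [solution_alt, hd]
    simp only [PySem.List.pyGetD_zero_cons, List.drop_one, List.tail_cons]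
    rw [pv_foldl_scan1]
    have hlenM : (((d :: tl).length : Nat) : Int) = (((d :: pvScan d tl).length : Nat) : Int) := by
      simp [pvScan_length]
    rw [hlenM]
    simp only [pv_map_diffs1]
    rw [pv_filter_bounds1 d (pvScan d tl), pv_pvB_scan]
    rw [show (((d :: pvScan d tl).length : Nat) : Int) = ((tl.length : Int) + 1) from by
      simp [pvScan_length]]
    exact pv_diffs_bnds d tl

-- ===== VERDICT (by name: the statement is the Claim_ definition above) =====
theorem solution_spec : Claim_unchanged_solution := by
  intro progresses speeds _hdom hpre hnd
  have hzlen : (progresses.zip speeds).length = min progresses.length speeds.length := by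
    simp
  have h1 : 1 ≤ (progresses.zip speeds).length := by
    rw [hzlen]
    obtain ⟨hp, hs, _⟩ := hpre
    have : 0 < progresses.length := List.length_pos_of_ne_nil hp
    have : 0 < speeds.length := List.length_pos_of_ne_nil hs
    omega
  have h2 : 2 ≤ (progresses.zip speeds).length := by
    unfold D_solution at hnd
    rw [hzlen] at h1 ⊢
    omega
  have hne : progresses.zip speeds ≠ [] := by
    intro hc; rw [hc] at h1; simp at h1
  rw [pv_solution_eq_spec progresses speeds h2, pv_alt_eq_spec progresses speeds hne]

theorem solution_changed : Claim_changed_solution := by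
  unfold Claim_changed_solution
  refine ⟨by decide, by decide, by decide, ?_, ?_, by decide⟩
  · show solution [93] [1] = []
    unfold solution
    rw [pv_days_eq]
    show ((PySem.List.pyRange 1 (1 : Int) 1).foldl (pvAbody [pvCeilDays 93 1])
      ([], PySem.List.pyGetD [pvCeilDays 93 1] 0 0, 1)).1 = []
    rw [PySem.List.pyRange_one_eq_nil (by norm_num)]
    rfl
  · show solution_alt [93] [1] = [1]
    rw [pv_alt_eq_spec [93] [1] (by decide)]
    simp [pvSpec]

theorem solution_tight : Claim_exact_solution := by
  intro progresses speeds _hdom hpre hd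
  have hzlen : (progresses.zip speeds).length = 1 := by
    unfold D_solution at hd
    simp [hd]
  cases hz : progresses.zip speeds with
  | nil => rw [hz] at hzlen; simp at hzlen
  | cons q qs =>
    have hqs : qs = [] := by
      rw [hz] at hzlen; simp at hzlen; exact hzlen
    subst hqs
    have halt : solution_alt progresses speeds = [1] := by
      rw [pv_alt_eq_spec progresses speeds (by rw [hz]; exact List.cons_ne_nil q []), hz]
      simp [pvSpec]
    have hsol : solution progresses speeds = [] := by
      unfold solution
      rw [pv_days_eq, hz]
      show ((PySem.List.pyRange 1 (1 : Int) 1).foldl (pvAbody [pvCeilDays q.1 q.2])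
        ([], PySem.List.pyGetD [pvCeilDays q.1 q.2] 0 0, 1)).1 = []
      rw [PySem.List.pyRange_one_eq_nil (by norm_num)]
      rfl
    rw [halt, hsol]
    simp
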